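-- pv_equiv track=rewrite | github.com/XinnuoXu/AdventofCode | 2020/day_7.py | reverse_kv
-- ===== SOURCE A (Python) =====
-- def reverse_kv(input):
--     reversed_rules = {}
--     for key in input:
--         values = input[key]
--         for color in values:
--             if color not in reversed_rules:
--                 reversed_rules[color] = []
--             num = values[color]
--             reversed_rules[color].append((key, num))
--     return reversed_rules
-- ===== SOURCE B (Python) =====
-- def reverse_kv(input):
--     # Two-pass decomposition: first list the distinct colors in encounter order,
--     # then build each color's bag list by one comprehension scan per color.
--     colors = list(dict.fromkeys(c for vals in input.values() for c in vals))
--     return {c: [(k, vals[c]) for k, vals in input.items() if c in vals]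
--             for c in colors}
-- ===== Notes on version B (the rewrite author's own statement) =====
-- stated objective: alternative
-- what changed: Replaces the single pass that mutates a growing dict-of-lists with a two-pass decomposition: first compute the distinct colors in encounter order via dict.fromkeys, then build each color's list with an independent comprehension scan over the input.
import Mathlib
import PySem

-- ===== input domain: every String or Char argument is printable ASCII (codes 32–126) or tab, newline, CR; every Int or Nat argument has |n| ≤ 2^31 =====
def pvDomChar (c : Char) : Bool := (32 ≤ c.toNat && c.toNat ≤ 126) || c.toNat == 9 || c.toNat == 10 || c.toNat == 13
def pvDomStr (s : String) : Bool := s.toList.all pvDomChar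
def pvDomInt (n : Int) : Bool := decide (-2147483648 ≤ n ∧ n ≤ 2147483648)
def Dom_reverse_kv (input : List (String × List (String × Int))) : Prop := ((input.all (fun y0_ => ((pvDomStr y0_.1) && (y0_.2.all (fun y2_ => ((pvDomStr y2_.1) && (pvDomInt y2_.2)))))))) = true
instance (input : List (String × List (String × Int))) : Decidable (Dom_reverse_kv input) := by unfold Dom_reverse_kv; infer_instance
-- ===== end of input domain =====

-- B replaces A's single mutating-dict pass by a two-pass decomposition (distinct colors first,
-- then one scan per color); the return values are proved equal on every dict-shaped input.

-- ===== PORT A =====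
-- A's single pass: for each key, look the key up, and for each color ensure a slot then append.
def reverse_kv (input : List (String × List (String × Int))) : List (String × List (String × Int)) :=
  (input.foldl (fun rr kv =>
      let values := (PySem.Dict.mk input).getD kv.1 []          -- values = input[key]
      values.foldl (fun rr cv =>
        let rr := if rr.contains cv.1 then rr else rr.insert cv.1 []   -- if color not in reversed_rules: ... = []
        let num := (PySem.Dict.mk values).getD cv.1 0                  -- num = values[color]
        rr.modify cv.1 [] (fun l => l ++ [(kv.1, num)])) rr)           -- reversed_rules[color].append((key, num))
    PySem.Dict.empty).items

-- ===== PORT B =====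
-- B's two passes: distinct colors in encounter order, then per-color comprehension over the input.
def reverse_kv_alt (input : List (String × List (String × Int))) : List (String × List (String × Int)) :=
  let colors := PySem.List.dedup (input.flatMap (fun kv => kv.2.map (fun cv => cv.1)))
  colors.map (fun c =>
    (c, input.filterMap (fun kv => ((PySem.Dict.mk kv.2).get? c).map (fun n => (kv.1, n)))))

-- ===== PRECONDITION & SPEC =====
-- Pre_ is the dict representation invariant: the argument is a Python dict of dicts, which cannot
-- hold duplicate keys, so the outer key list and each inner key list are duplicate-free.
def Pre_reverse_kv (input : List (String × List (String × Int))) : Prop :=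
  (input.map (fun kv => kv.1)).Nodup ∧ ∀ kv ∈ input, (kv.2.map (fun cv => cv.1)).Nodup
instance (input : List (String × List (String × Int))) : Decidable (Pre_reverse_kv input) := by unfold Pre_reverse_kv; infer_instance
def pvWitness_reverse_kv : (List (String × List (String × Int))) := [("a", [("b", 1), ("c", 2)]), ("d", [("b", 3)])]
def Spec_reverse_kv (input : List (String × List (String × Int))) (out : List (String × List (String × Int))) : Prop := out = reverse_kv_alt input
instance (input : List (String × List (String × Int))) (out : List (String × List (String × Int))) : Decidable (Spec_reverse_kv input out) := by unfold Spec_reverse_kv; infer_instance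

-- ===== CLAIM (what is proved, stated in full; the proofs are below) =====
def Claim_equal_reverse_kv : Prop := ∀ (input : List (String × List (String × Int))), Dom_reverse_kv input → Pre_reverse_kv input → Spec_reverse_kv input (reverse_kv input)

-- ===== LEMMAS AND PROOFS =====

def pvEdges (input : List (String × List (String × Int))) : List (String × (String × Int)) :=
  input.flatMap (fun kv => kv.2.map (fun cv => (cv.1, (kv.1, cv.2))))

theorem pv_foldl_flatMap {α β σ : Type} (g : α → List β) (f : σ → β → σ) (l : List α) (init : σ) :
    (l.flatMap g).foldl f init = l.foldl (fun acc x => (g x).foldl f acc) init := by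
  induction l generalizing init with
  | nil => rfl
  | cons h t ih => simp [List.foldl_append, ih]

theorem pv_ensure_modify {κ ν : Type} [BEq κ] [LawfulBEq κ]
    (rr : PySem.Dict κ (List ν)) (c : κ) (x : ν) :
    (if rr.contains c then rr else rr.insert c []).modify c [] (fun l => l ++ [x])
      = rr.modify c [] (fun l => l ++ [x]) := by
  by_cases h : rr.contains c = true
  · simp [h]
  · simp only [h, if_neg, Bool.false_eq_true, not_false_iff]
    simp only [PySem.Dict.modify, PySem.Dict.getD_insert_self, PySem.Dict.insert_insert_self]
    rw [PySem.Dict.getD_of_not_contains rr ([] : List ν) (by simpa using h)]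

-- A's fold, with lookups resolved and the "ensure slot" step collapsed, is the edge fold.
theorem pv_A_eq_edge_fold (input : List (String × List (String × Int)))
    (hpre : Pre_reverse_kv input) :
    reverse_kv input
      = ((pvEdges input).foldl (fun d p => d.modify p.1 [] (fun l => l ++ [p.2]))
          PySem.Dict.empty).items := by
  obtain ⟨hout, hin⟩ := hpre
  unfold reverse_kv pvEdges
  rw [pv_foldl_flatMap]
  congr 1
  apply PySem.List.foldl_congr_mem
  intro acc kv hkv
  have hvals : (PySem.Dict.mk input).getD kv.1 [] = kv.2 := by
    apply PySem.Dict.getD_of_mem_items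
    · exact hkv
    · simpa [PySem.Dict.keys] using hout
  simp only [hvals, List.foldl_map]
  apply PySem.List.foldl_congr_mem
  intro acc2 cv hcv
  have hnum : (PySem.Dict.mk kv.2).getD cv.1 0 = cv.2 := by
    apply PySem.Dict.getD_of_mem_items
    · exact hcv
    · simpa [PySem.Dict.keys] using hin kv hkv
  simp only [hnum, pv_ensure_modify]

-- with Nodup keys, filtering by a key keeps exactly the first (only) match
theorem pv_filter_eq_find {ν : Type} (vals : List (String × ν)) (c : String)
    (hnd : (vals.map (fun cv => cv.1)).Nodup) :
    vals.filter (fun cv => cv.1 == c) = (vals.find? (fun cv => cv.1 == c)).toList := by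
  induction vals with
  | nil => rfl
  | cons a t ih =>
    simp only [List.map_cons, List.nodup_cons] at hnd
    by_cases h : a.1 = c
    · subst h
      simp only [List.filter_cons, List.find?_cons, beq_self_eq_true, if_pos, Option.toList_some]
      have : t.filter (fun cv => cv.1 == a.1) = [] := by
        apply List.filter_eq_nil_iff.mpr
        intro cv hcv hbeq
        apply hnd.1
        have hc : cv.1 = a.1 := by simpa using hbeq
        exact hc ▸ List.mem_map_of_mem hcv
      simp [this]
    · have hb : (a.1 == c) = false := by simpa using h
      simp only [List.filter_cons, List.find?_cons, hb, if_neg, Bool.false_eq_true,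
        not_false_iff]
      exact ih hnd.2

-- B's per-color comprehension equals the projected filter of the edge list
theorem pv_B_column (input : List (String × List (String × Int))) (c : String)
    (hin : ∀ kv ∈ input, (kv.2.map (fun cv => cv.1)).Nodup) :
    input.filterMap (fun kv => ((PySem.Dict.mk kv.2).get? c).map (fun n => (kv.1, n)))
      = ((pvEdges input).filter (fun p => p.1 == c)).map (fun p => p.2) := by
  induction input with
  | nil => rfl
  | cons kv t ih =>
    have hnd := hin kv (List.mem_cons_self ..)
    simp only [pvEdges, List.flatMap_cons, List.filter_append, List.map_append,
      List.filterMap_cons]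
    have htail := ih (fun kv' h => hin kv' (List.mem_cons_of_mem _ h))
    simp only [pvEdges] at htail
    rw [← htail]
    have hhead : ((kv.2.map (fun cv => (cv.1, (kv.1, cv.2)))).filter (fun p => p.1 == c)).map
        (fun p => p.2)
        = match (PySem.Dict.mk kv.2).get? c with
          | some n => [(kv.1, n)]
          | none => [] := by
      rw [List.filter_map, List.map_map]
      have : (fun p => p.1 == c) ∘ (fun cv : String × Int => (cv.1, (kv.1, cv.2)))
          = fun cv => cv.1 == c := rfl
      rw [this, pv_filter_eq_find kv.2 c hnd]
      simp only [PySem.Dict.get?]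
      cases kv.2.find? (fun cv => cv.1 == c) <;> rfl
    rw [hhead]
    cases (PySem.Dict.mk kv.2).get? c <;> simp

theorem pv_main (input : List (String × List (String × Int)))
    (hpre : Pre_reverse_kv input) :
    reverse_kv input = reverse_kv_alt input := by
  rw [pv_A_eq_edge_fold input hpre]
  unfold reverse_kv_alt
  have hkeys : ((pvEdges input).foldl (fun d p => d.modify p.1 [] (fun l => l ++ [p.2]))
      PySem.Dict.empty).keys = PySem.Set.ofList ((pvEdges input).map (fun p => p.1)) := by
    rw [PySem.Dict.keys_foldl_modify_key]
    rfl
  have hnd : ((pvEdges input).foldl (fun d p => d.modify p.1 [] (fun l => l ++ [p.2]))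
      PySem.Dict.empty).keys.Nodup :=
    PySem.Dict.nodup_keys_foldl_modify_key _ _ _ _ _ PySem.Dict.nodup_keys_empty
  rw [PySem.Dict.items_eq_map_keys _ hnd ([] : List (String × Int)), hkeys]
  have hcolors : PySem.List.dedup (input.flatMap (fun kv => kv.2.map (fun cv => cv.1)))
      = PySem.Set.ofList ((pvEdges input).map (fun p => p.1)) := by
    simp [pvEdges, PySem.List.dedup, List.map_flatMap, List.map_map, Function.comp_def]
  rw [← hcolors]
  apply List.map_congr_left
  intro c hc
  congr 1
  rw [PySem.Dict.getD_foldl_modify_append, PySem.Dict.getD_empty, List.nil_append]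
  exact (pv_B_column input c hpre.2).symm


-- ===== VERDICT (by name: the statement is the Claim_ definition above) =====
theorem reverse_kv_spec : Claim_equal_reverse_kv := by
  intro input _ hpre
  exact pv_main input hpre
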